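-- pv_equiv track=rewrite | github.com/jlazear/advent2019 | day20/star40.py | clean_maze
-- ===== SOURCE A (Python) =====
-- from copy import deepcopy
--
-- def clean_maze(maze):
--     xs = [coord[0] for coord, value in maze.items() if value == '#']
--     ys = [coord[1] for coord, value in maze.items() if value == '#']
--     xmin, xmax = min(xs), max(xs)
--     ymin, ymax = min(ys), max(ys)
--
--     todel = []
--     toadd = []
--     maze2 = deepcopy(maze)
--     for coord, c in maze2.items():
--         if c in '#. ':
--             continue
--         i, j = coord
--         bottom = (i+1, j)
--         bbottom = (i+2, j)
--         top = (i-1, j)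
--         ttop = (i-2, j)
--         left = (i, j-1)
--         lleft = (i, j-2)
--         right = (i, j+1)
--         rright = (i, j+2)
--         if (c2 := maze[bottom]) not in '#. ':  # found top of vertical
--             name = c + c2
--             newloc = top if maze[top] == '.' else bbottom
--             todel.extend([coord, bottom])
--         elif (c2 := maze[top]) not in '#. ':  # found bottom of vertical
--             name = c2 + c
--             newloc = bottom if maze[bottom] == '.' else ttop
--             todel.extend([coord, top])
--         elif (c2 := maze[right]) not in '#. ':  # found left of horizontal
--             name = c + c2
--             newloc = left if maze[left] == '.' else rright
--             todel.extend([coord, right])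
--         elif (c2 := maze[left]) not in '#. ':  # found right of horizontal
--             name = c2 + c
--             newloc = right if maze[right] == '.' else lleft
--             todel.extend([coord, left])
--         toadd.append((newloc, name))
--     for coord in set(todel):
--         del maze[coord]
--     for coord, name in set(toadd):
--         x, y = coord
--         if x in (xmin, xmax) or y in (ymin, ymax):
--             name += 'out'
--         else:
--             name += 'in'
--         maze[coord] = name
--     return maze
-- ===== SOURCE B (Python) =====
-- def clean_maze(maze):
--     # Pair-centric rewrite: portals are found as adjacent letter PAIRS (scanning only
--     # down/right from each letter) instead of A's per-cell four-way neighbour priority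
--     # chain; the portal anchor is whichever of the pair's two outer ends holds '.'.
--     # Mutates maze in place, like the original; equivalence is about the return value.
--     letters = {k: v for k, v in maze.items() if v not in '#. '}
--     hashes = [k for k, v in maze.items() if v == '#']
--     xmin = min(k[0] for k in hashes)
--     xmax = max(k[0] for k in hashes)
--     ymin = min(k[1] for k in hashes)
--     ymax = max(k[1] for k in hashes)
--     portals = {}
--     for (i, j), c in letters.items():
--         for di, dj in ((1, 0), (0, 1)):
--             mate = (i + di, j + dj)
--             if mate in letters:
--                 name = c + letters[mate]
--                 ends = [(i - di, j - dj), (i + 2 * di, j + 2 * dj)]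
--                 newloc = next(e for e in ends if maze.get(e) == '.')
--                 portals[newloc] = name
--     for k in letters:
--         del maze[k]
--     for (x, y), name in portals.items():
--         suffix = 'out' if x in (xmin, xmax) or y in (ymin, ymax) else 'in'
--         maze[(x, y)] = name + suffix
--     return maze
-- ===== Notes on version B (the rewrite author's own statement) =====
-- stated objective: alternative
-- what changed: A visits every letter cell and resolves it through a four-way neighbour-priority elif chain, producing each portal twice and deduplicating through set(); B builds a letter index and finds each portal once as an adjacent pair by scanning only DOWN and RIGHT from each letter, takes the anchor as whichever of the pair's two outer ends holds '.', and collects portals in a dict keyed by anchor.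
import Mathlib
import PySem

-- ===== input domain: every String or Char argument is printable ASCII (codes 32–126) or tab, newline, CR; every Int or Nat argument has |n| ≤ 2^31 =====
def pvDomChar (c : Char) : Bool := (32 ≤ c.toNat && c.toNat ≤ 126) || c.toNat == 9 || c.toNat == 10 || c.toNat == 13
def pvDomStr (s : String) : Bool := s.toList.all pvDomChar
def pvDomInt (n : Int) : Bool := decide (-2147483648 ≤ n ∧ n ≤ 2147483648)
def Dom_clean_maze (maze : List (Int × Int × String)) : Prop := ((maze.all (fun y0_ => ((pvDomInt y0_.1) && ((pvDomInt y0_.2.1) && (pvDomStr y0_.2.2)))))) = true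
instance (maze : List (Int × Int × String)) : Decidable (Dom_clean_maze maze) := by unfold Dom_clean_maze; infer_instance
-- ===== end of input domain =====

-- B finds each portal once as an adjacent letter PAIR (scanning only down/right through a
-- letter index) with the anchor = the '.' outer end, instead of A's per-cell four-way
-- neighbour-priority chain run at both letter cells and dedup'ed with set(); equivalence is
-- about the RETURN value (both Pythons also mutate the argument dict alike).

-- Python dict[tuple[int,int], str] ⇔ PySem.Dict (Int × Int) String (marshalling shared by both ports)
def pvToDict (maze : List (Int × Int × String)) : PySem.Dict (Int × Int) String :=
  maze.foldl (fun d t => d.insert (t.1, t.2.1) t.2.2) PySem.Dict.empty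

def pvOfDict (d : PySem.Dict (Int × Int) String) : List (Int × Int × String) :=
  d.items.map (fun p => (p.1.1, p.1.2, p.2))

-- ===== PORT A =====
-- literal transliteration of A: bounding box via two comprehensions + min/max, then one pass
-- over all cells appending to todel/toadd (each portal is produced at BOTH of its letter
-- cells), set() dedup, delete, re-insert.  maze[k] lookups are ported as getD with junk
-- default "" and min/max of possibly-empty lists as .getD 0: Pre_ excludes exactly the
-- inputs where the Python raises (KeyError / ValueError / NameError or reuses stale loop
-- variables) or where set()/dedup order could matter.
-- the body of A's per-cell loop: state = (todel, toadd)
def pvBodyA (d : PySem.Dict (Int × Int) String)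
    (st : List (Int × Int) × List ((Int × Int) × String))
    (p : (Int × Int) × String) : List (Int × Int) × List ((Int × Int) × String) :=
  if PySem.Str.isIn p.2 "#. " then st
  else
    let i := p.1.1
    let j := p.1.2
    let c := p.2
    let c2b := d.getD (i + 1, j) ""
    if !PySem.Str.isIn c2b "#. " then       -- found top of vertical
      (st.1 ++ [(i, j), (i + 1, j)],
       st.2 ++ [((if d.getD (i - 1, j) "" == "." then (i - 1, j) else (i + 2, j)), c ++ c2b)])
    else
      let c2t := d.getD (i - 1, j) ""
      if !PySem.Str.isIn c2t "#. " then     -- found bottom of vertical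
        (st.1 ++ [(i, j), (i - 1, j)],
         st.2 ++ [((if d.getD (i + 1, j) "" == "." then (i + 1, j) else (i - 2, j)), c2t ++ c)])
      else
        let c2r := d.getD (i, j + 1) ""
        if !PySem.Str.isIn c2r "#. " then   -- found left of horizontal
          (st.1 ++ [(i, j), (i, j + 1)],
           st.2 ++ [((if d.getD (i, j - 1) "" == "." then (i, j - 1) else (i, j + 2)), c ++ c2r)])
        else
          let c2l := d.getD (i, j - 1) ""
          if !PySem.Str.isIn c2l "#. " then -- found right of horizontal
            (st.1 ++ [(i, j), (i, j - 1)],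
             st.2 ++ [((if d.getD (i, j + 1) "" == "." then (i, j + 1) else (i, j - 2)), c2l ++ c)])
          else  -- Python: name/newloc unbound or stale from an earlier iteration; outside Pre_
            (st.1, st.2 ++ [((0, 0), "")])

-- the body of the final re-insertion loop (this loop is literally identical in both Pythons;
-- each port passes its own bounds)
def pvAddBody (xmin xmax ymin ymax : Int)
    (dd : PySem.Dict (Int × Int) String) (pr : (Int × Int) × String) :
    PySem.Dict (Int × Int) String :=
  dd.insert pr.1
    (pr.2 ++ (if pr.1.1 == xmin || pr.1.1 == xmax || pr.1.2 == ymin || pr.1.2 == ymax then "out" else "in"))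

def clean_maze (maze : List (Int × Int × String)) : List (Int × Int × String) :=
  let d := pvToDict maze
  let xs := (d.items.filter (fun p => p.2 == "#")).map (fun p => p.1.1)
  let ys := (d.items.filter (fun p => p.2 == "#")).map (fun p => p.1.2)
  let xmin := (PySem.List.min? xs (fun x => x)).getD 0
  let xmax := (PySem.List.max? xs (fun x => x)).getD 0
  let ymin := (PySem.List.min? ys (fun x => x)).getD 0
  let ymax := (PySem.List.max? ys (fun x => x)).getD 0
  let st := d.items.foldl (pvBodyA d) ([], [])
  let d1 := (PySem.Set.ofList st.1).foldl (fun dd c => dd.erase c) d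
  let d2 := (PySem.Set.ofList st.2).foldl (pvAddBody xmin xmax ymin ymax) d1
  pvOfDict d2

-- ===== PORT B =====
-- transliteration of B (Source B): letter-index dict comprehension, '#' key list, then one loop
-- over the index scanning only down/right for the pair's mate; the anchor is the '.' end of
-- the pair (next() over the filtered ends; StopIteration = outside Pre_), portals keyed by
-- anchor, then delete/insert.
def pvLetB (ld : PySem.Dict (Int × Int) String) (p : (Int × Int) × String) :
    PySem.Dict (Int × Int) String :=
  if !PySem.Str.isIn p.2 "#. " then ld.insert p.1 p.2 else ld

-- B's per-letter loop body: the inner 'for di, dj in ((1, 0), (0, 1))'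
def pvPairB (d letters : PySem.Dict (Int × Int) String)
    (acc : PySem.Dict (Int × Int) String) (p : (Int × Int) × String) :
    PySem.Dict (Int × Int) String :=
  [((1 : Int), (0 : Int)), (0, 1)].foldl
    (fun acc dv =>
      if letters.contains (p.1.1 + dv.1, p.1.2 + dv.2) then
        let name := p.2 ++ letters.getD (p.1.1 + dv.1, p.1.2 + dv.2) ""
        let ends := [(p.1.1 - dv.1, p.1.2 - dv.2), (p.1.1 + 2 * dv.1, p.1.2 + 2 * dv.2)]
        match (ends.filter (fun e => d.getD e "" == ".")).head? with
        | some newloc => acc.insert newloc name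
        | none => acc   -- Python raises StopIteration here: outside Pre_
      else acc) acc

def clean_maze_alt (maze : List (Int × Int × String)) : List (Int × Int × String) :=
  let d := pvToDict maze
  let letters := d.items.foldl pvLetB PySem.Dict.empty
  let hashes := (d.items.filter (fun p => p.2 == "#")).map (fun p => p.1)
  let xmin := (PySem.List.min? (hashes.map (fun k => k.1)) (fun x => x)).getD 0
  let xmax := (PySem.List.max? (hashes.map (fun k => k.1)) (fun x => x)).getD 0
  let ymin := (PySem.List.min? (hashes.map (fun k => k.2)) (fun x => x)).getD 0
  let ymax := (PySem.List.max? (hashes.map (fun k => k.2)) (fun x => x)).getD 0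
  let portals := letters.items.foldl (pvPairB d letters) PySem.Dict.empty
  let d1 := letters.keys.foldl (fun dd c => dd.erase c) d
  let d2 := portals.items.foldl (pvAddBody xmin xmax ymin ymax) d1
  pvOfDict d2

-- ===== PRECONDITION & SPEC =====

-- helper predicates over the input dict (closed-form shape conditions; no loop over the algorithm)
def pvIsL (d : PySem.Dict (Int × Int) String) (q : Int × Int) : Bool :=
  match d.get? q with
  | some v => !PySem.Str.isIn v "#. "
  | none => false

def pvNl (d : PySem.Dict (Int × Int) String) (q : Int × Int) : Bool :=
  match d.get? q with
  | some v => PySem.Str.isIn v "#. "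
  | none => false

def pvDotX (d : PySem.Dict (Int × Int) String) (a b : Int × Int) : Bool :=
  (d.getD a "" == ".") != (d.getD b "" == ".")

def pvCellOK (d : PySem.Dict (Int × Int) String) (i j : Int) : Bool :=
  (pvIsL d (i+1,j) && pvNl d (i-1,j) && !pvIsL d (i,j+1) && !pvIsL d (i,j-1) && pvNl d (i+2,j) && pvDotX d (i-1,j) (i+2,j))
  || (pvNl d (i+1,j) && pvIsL d (i-1,j) && !pvIsL d (i,j+1) && !pvIsL d (i,j-1) && pvNl d (i-2,j) && pvDotX d (i-2,j) (i+1,j))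
  || (pvNl d (i+1,j) && pvNl d (i-1,j) && pvIsL d (i,j+1) && pvNl d (i,j-1) && pvNl d (i,j+2) && pvDotX d (i,j-1) (i,j+2))
  || (pvNl d (i+1,j) && pvNl d (i-1,j) && pvNl d (i,j+1) && pvIsL d (i,j-1) && pvNl d (i,j-2) && pvDotX d (i,j-2) (i,j+1))

def pvPartner (d : PySem.Dict (Int × Int) String) (q : Int × Int) : Int × Int :=
  if pvIsL d (q.1+1, q.2) then (q.1+1, q.2)
  else if pvIsL d (q.1-1, q.2) then (q.1-1, q.2)
  else if pvIsL d (q.1, q.2+1) then (q.1, q.2+1)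
  else (q.1, q.2-1)

def pvNewloc (d : PySem.Dict (Int × Int) String) (q : Int × Int) : Int × Int :=
  if pvIsL d (q.1+1, q.2) then (if d.getD (q.1-1, q.2) "" == "." then (q.1-1, q.2) else (q.1+2, q.2))
  else if pvIsL d (q.1-1, q.2) then (if d.getD (q.1+1, q.2) "" == "." then (q.1+1, q.2) else (q.1-2, q.2))
  else if pvIsL d (q.1, q.2+1) then (if d.getD (q.1, q.2-1) "" == "." then (q.1, q.2-1) else (q.1, q.2+2))
  else (if d.getD (q.1, q.2+1) "" == "." then (q.1, q.2+1) else (q.1, q.2-2))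

-- Pre_ restricts to well-formed portal mazes (some '#' cell; every label cell has exactly one
-- adjacent label cell; both outer neighbours of each label pair are present non-label cells of
-- which exactly one is '.'; distinct label pairs land on distinct cells).  Outside this A's
-- per-cell scan raises KeyError/ValueError/NameError (B likewise raises on labels paired
-- without a '.' end), or the corner is one no maze specification fixes (a label pair flanked
-- by two '.' cells, or two portals aimed at the same cell, where A's set() iteration order
-- decides): there A's and B's relabelings are both defensible.
def Pre_clean_maze (maze : List (Int × Int × String)) : Prop :=
  ((pvToDict maze).items.any (fun p => p.2 == "#")) = true
  ∧ (∀ p ∈ (pvToDict maze).items, PySem.Str.isIn p.2 "#. " = false →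
       pvCellOK (pvToDict maze) p.1.1 p.1.2 = true)
  ∧ (∀ p ∈ (pvToDict maze).items, ∀ q ∈ (pvToDict maze).items,
       PySem.Str.isIn p.2 "#. " = false → PySem.Str.isIn q.2 "#. " = false →
       p.1 ≠ q.1 → q.1 ≠ pvPartner (pvToDict maze) p.1 →
       pvNewloc (pvToDict maze) p.1 ≠ pvNewloc (pvToDict maze) q.1)

instance (maze : List (Int × Int × String)) : Decidable (Pre_clean_maze maze) := by
  unfold Pre_clean_maze; infer_instance

def pvWitness_clean_maze : (List (Int × Int × String)) :=
  [(0, 0, "#"), (1, 0, "A"), (2, 0, "B"), (3, 0, "."), (0, 1, "#")]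

def Spec_clean_maze (maze : List (Int × Int × String)) (out : List (Int × Int × String)) : Prop :=
  out = clean_maze_alt maze
instance (maze : List (Int × Int × String)) (out : List (Int × Int × String)) : Decidable (Spec_clean_maze maze out) := by
  unfold Spec_clean_maze; infer_instance

-- ===== CLAIM (what is proved, stated in full; the proofs are below) =====
def Claim_equal_clean_maze : Prop := ∀ (maze : List (Int × Int × String)), Dom_clean_maze maze → Pre_clean_maze maze → Spec_clean_maze maze (clean_maze maze)

-- ===== LEMMAS AND PROOFS =====

-- abbreviations used only by the proofs
def pvPredL (p : (Int × Int) × String) : Bool := !PySem.Str.isIn p.2 "#. "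

def pvL (d : PySem.Dict (Int × Int) String) : List ((Int × Int) × String) :=
  d.items.filter pvPredL

-- the (newloc, name) entry A computes at a letter cell, as a function of the item
def pvEntry (d : PySem.Dict (Int × Int) String) (p : (Int × Int) × String) : (Int × Int) × String :=
  if pvIsL d (p.1.1+1, p.1.2) then
    ((if d.getD (p.1.1-1, p.1.2) "" == "." then (p.1.1-1, p.1.2) else (p.1.1+2, p.1.2)),
     p.2 ++ d.getD (p.1.1+1, p.1.2) "")
  else if pvIsL d (p.1.1-1, p.1.2) then
    ((if d.getD (p.1.1+1, p.1.2) "" == "." then (p.1.1+1, p.1.2) else (p.1.1-2, p.1.2)),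
     d.getD (p.1.1-1, p.1.2) "" ++ p.2)
  else if pvIsL d (p.1.1, p.1.2+1) then
    ((if d.getD (p.1.1, p.1.2-1) "" == "." then (p.1.1, p.1.2-1) else (p.1.1, p.1.2+2)),
     p.2 ++ d.getD (p.1.1, p.1.2+1) "")
  else
    ((if d.getD (p.1.1, p.1.2+1) "" == "." then (p.1.1, p.1.2+1) else (p.1.1, p.1.2-2)),
     d.getD (p.1.1, p.1.2-1) "" ++ p.2)

-- the anchor condition B's down/right scan selects: the pair's mate lies below or right
def pvAnch (d : PySem.Dict (Int × Int) String) (q : Int × Int) : Bool :=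
  pvIsL d (q.1+1, q.2) || pvIsL d (q.1, q.2+1)

theorem pvEntry_fst (d : PySem.Dict (Int × Int) String) (p : (Int × Int) × String) :
    (pvEntry d p).1 = pvNewloc d p.1 := by
  unfold pvEntry pvNewloc; split_ifs <;> rfl

theorem pv_isL_getD (d : PySem.Dict (Int × Int) String) (q : Int × Int) :
    (!PySem.Str.isIn (d.getD q "") "#. ") = pvIsL d q := by
  unfold pvIsL
  rw [PySem.Dict.getD_eq_get?_getD]
  cases h : d.get? q with
  | none => simp
  | some v => simp

theorem pv_nl_isL_false (d : PySem.Dict (Int × Int) String) (q : Int × Int)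
    (h : pvNl d q = true) : pvIsL d q = false := by
  unfold pvNl at h; unfold pvIsL
  cases hq : d.get? q with
  | none => rfl
  | some v => rw [hq] at h; simp only [] at h; simpa using h

theorem pv_isL_nl_false (d : PySem.Dict (Int × Int) String) (q : Int × Int)
    (h : pvIsL d q = true) : pvNl d q = false := by
  unfold pvIsL at h; unfold pvNl
  cases hq : d.get? q with
  | none => rfl
  | some v => rw [hq] at h; simp only [Bool.not_eq_true'] at h; simpa using h

theorem pvToDict_nodup (maze : List (Int × Int × String)) : (pvToDict maze).keys.Nodup := by
  unfold pvToDict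
  exact PySem.Dict.nodup_keys_foldl_insert_key maze (fun t => (t.1, t.2.1)) (fun d x => x.2.2)
    PySem.Dict.empty PySem.Dict.nodup_keys_empty

theorem pvL_fst_nodup (d : PySem.Dict (Int × Int) String) (hnd : d.keys.Nodup) :
    ((pvL d).map Prod.fst).Nodup := by
  have hsub : ((pvL d).map Prod.fst).Sublist (d.items.map Prod.fst) :=
    List.Sublist.map Prod.fst (List.filter_sublist : ((pvL d)).Sublist d.items)
  have : d.keys = d.items.map Prod.fst := rfl
  exact (this ▸ hnd).sublist hsub

theorem pv_get?_of_memL (d : PySem.Dict (Int × Int) String) (hnd : d.keys.Nodup)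
    {p : (Int × Int) × String} (hp : p ∈ pvL d) : d.get? p.1 = some p.2 := by
  have : (p.1, p.2) ∈ d.items := by simpa using List.mem_of_mem_filter hp
  exact PySem.Dict.get?_of_mem_items d this hnd

theorem pv_getD_of_memL (d : PySem.Dict (Int × Int) String) (hnd : d.keys.Nodup)
    {p : (Int × Int) × String} (hp : p ∈ pvL d) : d.getD p.1 "" = p.2 := by
  rw [PySem.Dict.getD_eq_get?_getD, pv_get?_of_memL d hnd hp]; rfl

theorem pv_isL_of_memL (d : PySem.Dict (Int × Int) String) (hnd : d.keys.Nodup)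
    {p : (Int × Int) × String} (hp : p ∈ pvL d) : pvIsL d p.1 = true := by
  unfold pvIsL
  rw [pv_get?_of_memL d hnd hp]
  have := List.of_mem_filter hp
  unfold pvPredL at this
  exact this

theorem pv_exists_memL_of_isL (d : PySem.Dict (Int × Int) String)
    (q : Int × Int) (h : pvIsL d q = true) : ∃ v, (q, v) ∈ pvL d := by
  unfold pvIsL at h
  cases hq : d.get? q with
  | none => rw [hq] at h; exact absurd h (by simp)
  | some v =>
      refine ⟨v, ?_⟩
      rw [hq] at h
      exact List.mem_filter.mpr ⟨PySem.Dict.mem_items_of_get?_eq_some d hq, h⟩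

theorem pv_fst_memL_of_isL (d : PySem.Dict (Int × Int) String)
    (q : Int × Int) (h : pvIsL d q = true) : q ∈ (pvL d).map Prod.fst := by
  obtain ⟨v, hv⟩ := pv_exists_memL_of_isL d q h
  exact List.mem_map.mpr ⟨(q, v), hv, rfl⟩

-- A's loop as a flatMap: what one iteration contributes to todel / toadd
def pvStepA (d : PySem.Dict (Int × Int) String) (p : (Int × Int) × String) :
    List (Int × Int) × List ((Int × Int) × String) :=
  pvBodyA d ([], []) p

theorem pv_bodyA_shape (d : PySem.Dict (Int × Int) String)
    (st : List (Int × Int) × List ((Int × Int) × String)) (p : (Int × Int) × String) :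
    pvBodyA d st p = (st.1 ++ (pvStepA d p).1, st.2 ++ (pvStepA d p).2) := by
  unfold pvStepA pvBodyA
  by_cases h0 : PySem.Str.isIn p.2 "#. " <;> simp only [h0] <;> simp <;> split_ifs <;> simp

theorem pv_loopA_char (d : PySem.Dict (Int × Int) String) (l : List ((Int × Int) × String)) :
    ∀ s1 s2, l.foldl (pvBodyA d) (s1, s2)
      = (s1 ++ l.flatMap (fun p => (pvStepA d p).1), s2 ++ l.flatMap (fun p => (pvStepA d p).2)) := by
  induction l with
  | nil => intro s1 s2; simp
  | cons a l ih =>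
      intro s1 s2
      rw [List.foldl_cons, pv_bodyA_shape, ih]
      simp

theorem pv_flatMap_filter {α β : Type} (l : List α) (c : α → Bool) (f : α → List β)
    (h : ∀ x ∈ l, c x = false → f x = []) :
    l.flatMap f = (l.filter c).flatMap f := by
  induction l with
  | nil => rfl
  | cons a l ih =>
      by_cases ha : c a = true
      · simp [ha, ih (fun x hx => h x (List.mem_cons_of_mem a hx))]
      · simp only [Bool.not_eq_true] at ha
        simp [ha, h a (List.mem_cons_self) ha,
          ih (fun x hx => h x (List.mem_cons_of_mem a hx))]

theorem pv_flatMap_singleton_map {α β : Type} (l : List α) (f : α → β) :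
    l.flatMap (fun x => [f x]) = l.map f := by
  induction l with
  | nil => rfl
  | cons a l ih => simp [ih]

theorem pv_flatMap_congr {α β : Type} (l : List α) (f g : α → List β)
    (h : ∀ x ∈ l, f x = g x) : l.flatMap f = l.flatMap g := by
  induction l with
  | nil => rfl
  | cons a l ih =>
      simp [h a (List.mem_cons_self), ih (fun x hx => h x (List.mem_cons_of_mem a hx))]

theorem pvStepA_skip (d : PySem.Dict (Int × Int) String) {p : (Int × Int) × String}
    (h : PySem.Str.isIn p.2 "#. " = true) : pvStepA d p = ([], []) := by
  unfold pvStepA pvBodyA; simp only [h]; simp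

theorem pvStepA_letter (d : PySem.Dict (Int × Int) String)
    {p : (Int × Int) × String} (hp : p ∈ pvL d)
    (hok : pvCellOK d p.1.1 p.1.2 = true) :
    pvStepA d p = ([p.1, pvPartner d p.1], [pvEntry d p]) := by
  have hpred : pvPredL p = true := List.of_mem_filter hp
  unfold pvPredL at hpred
  rw [Bool.not_eq_true'] at hpred
  unfold pvStepA pvBodyA
  simp only [hpred, Bool.false_eq_true, if_false]
  simp only [pv_isL_getD]
  unfold pvCellOK at hok
  simp only [Bool.or_eq_true, Bool.and_eq_true] at hok
  rcases hok with ((h | h) | h) | h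
  · simp [pvPartner, pvEntry, h.1.1.1.1.1]
  · simp [pvPartner, pvEntry, pv_nl_isL_false _ _ h.1.1.1.1.1, h.1.1.1.1.2]
  · simp [pvPartner, pvEntry, pv_nl_isL_false _ _ h.1.1.1.1.1,
      pv_nl_isL_false _ _ h.1.1.1.1.2, h.1.1.1.2]
  · simp [pvPartner, pvEntry, pv_nl_isL_false _ _ h.1.1.1.1.1,
      pv_nl_isL_false _ _ h.1.1.1.1.2, pv_nl_isL_false _ _ h.1.1.1.2, h.1.1.2]

theorem pv_todel_eq (d : PySem.Dict (Int × Int) String)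
    (h2' : ∀ p ∈ pvL d, pvCellOK d p.1.1 p.1.2 = true) :
    d.items.flatMap (fun p => (pvStepA d p).1)
      = (pvL d).flatMap (fun p => [p.1, pvPartner d p.1]) := by
  rw [pv_flatMap_filter d.items pvPredL _ (by
    intro x _ hx
    unfold pvPredL at hx
    rw [Bool.not_eq_false'] at hx
    rw [pvStepA_skip d hx])]
  exact pv_flatMap_congr _ _ _ (fun x hx => by rw [pvStepA_letter d hx (h2' x hx)])

theorem pv_toadd_eq (d : PySem.Dict (Int × Int) String)
    (h2' : ∀ p ∈ pvL d, pvCellOK d p.1.1 p.1.2 = true) :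
    d.items.flatMap (fun p => (pvStepA d p).2) = (pvL d).map (pvEntry d) := by
  rw [pv_flatMap_filter d.items pvPredL _ (by
    intro x _ hx
    unfold pvPredL at hx
    rw [Bool.not_eq_false'] at hx
    rw [pvStepA_skip d hx])]
  show (pvL d).flatMap _ = _
  rw [pv_flatMap_congr (pvL d) _ (fun p => [pvEntry d p])
    (fun x hx => by rw [pvStepA_letter d hx (h2' x hx)])]
  exact pv_flatMap_singleton_map _ _

-- B's letter index: items, keys, contains and getD in terms of the letter sublist pvL
theorem pv_letters_items (d : PySem.Dict (Int × Int) String) (hnd : d.keys.Nodup) :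
    (d.items.foldl pvLetB PySem.Dict.empty).items = pvL d := by
  have h1 : d.items.foldl pvLetB PySem.Dict.empty
      = (pvL d).foldl (fun ld p => ld.insert p.1 p.2) PySem.Dict.empty := by
    have he : pvLetB = (fun ld (p : (Int × Int) × String) => if pvPredL p then ld.insert p.1 p.2 else ld) := rfl
    rw [he]
    unfold pvL
    exact PySem.List.foldl_if_eq_foldl_filter pvPredL _ d.items PySem.Dict.empty
  rw [h1, PySem.Dict.items_foldl_insert_fresh (pvL d) Prod.fst Prod.snd PySem.Dict.empty
    (fun a _ => by simp [PySem.Dict.contains_empty]) (pvL_fst_nodup d hnd)]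
  simp [PySem.Dict.empty]

theorem pv_letters_keys (d : PySem.Dict (Int × Int) String) (hnd : d.keys.Nodup) :
    (d.items.foldl pvLetB PySem.Dict.empty).keys = (pvL d).map Prod.fst := by
  show (d.items.foldl pvLetB PySem.Dict.empty).items.map Prod.fst = _
  rw [pv_letters_items d hnd]

theorem pv_letters_contains (d : PySem.Dict (Int × Int) String) (hnd : d.keys.Nodup)
    (q : Int × Int) :
    (d.items.foldl pvLetB PySem.Dict.empty).contains q = pvIsL d q := by
  have hmem : q ∈ (pvL d).map Prod.fst ↔ pvIsL d q = true := by
    constructor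
    · intro hq
      obtain ⟨x, hx, hx1⟩ := List.mem_map.mp hq
      exact hx1 ▸ pv_isL_of_memL d hnd hx
    · exact pv_fst_memL_of_isL d q
  rw [PySem.Dict.contains_eq_decide_mem_keys, pv_letters_keys d hnd]
  cases h : pvIsL d q
  · simp [hmem, h]
  · simp [hmem, h]

theorem pv_letters_getD (d : PySem.Dict (Int × Int) String) (hnd : d.keys.Nodup)
    (q : Int × Int) (h : pvIsL d q = true) :
    (d.items.foldl pvLetB PySem.Dict.empty).getD q "" = d.getD q "" := by
  obtain ⟨v, hv⟩ := pv_exists_memL_of_isL d q h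
  have hlnd : (d.items.foldl pvLetB PySem.Dict.empty).keys.Nodup := by
    rw [pv_letters_keys d hnd]; exact pvL_fst_nodup d hnd
  have hmem : (q, v) ∈ (d.items.foldl pvLetB PySem.Dict.empty).items := by
    rw [pv_letters_items d hnd]; exact hv
  rw [PySem.Dict.getD_of_mem_items _ hmem hlnd "", pv_getD_of_memL d hnd hv]

theorem pv_foldl_erase_items (l : List (Int × Int)) :
    ∀ dd : PySem.Dict (Int × Int) String,
      (l.foldl (fun dd c => dd.erase c) dd).items
        = dd.items.filter (fun pr => !l.contains pr.1) := by
  induction l with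
  | nil => intro dd; simp
  | cons a t ih =>
      intro dd
      rw [List.foldl_cons, ih]
      show (dd.erase a).items.filter _ = _
      unfold PySem.Dict.erase
      rw [List.filter_filter]
      apply List.filter_congr
      intro x _
      cases hx : (x.1 == a)
      · simp only [beq_eq_false_iff_ne] at hx
        simp [hx]
      · simp only [beq_iff_eq] at hx
        simp [hx]

theorem pv_loc_flip {α : Type} (u v : α) {x y : String}
    (h : ¬ ((x == ".") = (y == "."))) :
    (if (x == ".") = true then u else v) = (if (y == ".") = true then v else u) := by
  cases hx : (x == ".") <;> cases hy : (y == ".")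
  · exact absurd (hx.trans hy.symm) h
  · simp
  · simp
  · exact absurd (hx.trans hy.symm) h

-- the two cells of a portal pair compute the same entry, and pairing is an involution
theorem pv_pair_spec (d : PySem.Dict (Int × Int) String) (hnd : d.keys.Nodup)
    (h2' : ∀ r ∈ pvL d, pvCellOK d r.1.1 r.1.2 = true) :
    ∀ p ∈ pvL d, ∀ y ∈ pvL d, y.1 = pvPartner d p.1 →
      pvPartner d y.1 = p.1 ∧ pvEntry d y = pvEntry d p := by
  intro p hp y hy hyp
  obtain ⟨⟨i, j⟩, c⟩ := p
  obtain ⟨⟨yi, yj⟩, yc⟩ := y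
  have hokp := h2' _ hp
  have hoky := h2' _ hy
  have hpIsL : pvIsL d (i, j) = true := pv_isL_of_memL d hnd hp
  have hyIsL : pvIsL d (yi, yj) = true := pv_isL_of_memL d hnd hy
  have hpgetD : d.getD (i, j) "" = c := pv_getD_of_memL d hnd hp
  have hygetD : d.getD (yi, yj) "" = yc := pv_getD_of_memL d hnd hy
  simp only at hokp hoky hyp
  unfold pvCellOK at hokp hoky
  simp only [Bool.or_eq_true, Bool.and_eq_true] at hokp hoky
  rcases hokp with ((hk | hk) | hk) | hk
  · -- partner below: p = upper cell of a vertical pair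
    obtain ⟨⟨⟨⟨⟨p1, p2⟩, p3⟩, p4⟩, p5⟩, p6⟩ := hk
    have hP : pvPartner d (i, j) = (i + 1, j) := by unfold pvPartner; simp [p1]
    rw [hP] at hyp
    obtain ⟨hyi, hyj⟩ := Prod.mk.injEq .. |>.mp hyp
    subst hyi; subst hyj
    have e1 : i + 1 + 1 = i + 2 := by ring
    have e2 : i + 1 - 1 = i := by ring
    have e3 : i + 1 - 2 = i - 1 := by ring
    rw [e1, e2, e3] at hoky
    rcases hoky with ((hy' | hy') | hy') | hy'
    · exact absurd hy'.1.1.1.1.1 (by simp [pv_nl_isL_false _ _ p5])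
    · constructor
      · unfold pvPartner
        simp [e1, e2, pv_nl_isL_false _ _ p5, hpIsL]
      · unfold pvEntry
        simp only [e1, e2, e3]
        simp only [pv_nl_isL_false _ _ p5, Bool.false_eq_true, if_false, hpIsL, if_true, p1,
          hpgetD, hygetD]
        unfold pvDotX at p6
        simp only [Prod.mk.injEq]
        refine ⟨?_, by trivial⟩
        exact pv_loc_flip _ _ (Ne.symm (bne_iff_ne.mp p6))
    · exact absurd hy'.1.1.1.1.2 (by simp [pv_isL_nl_false _ _ hpIsL])
    · exact absurd hy'.1.1.1.1.2 (by simp [pv_isL_nl_false _ _ hpIsL])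
  · -- partner above: p = lower cell of a vertical pair
    obtain ⟨⟨⟨⟨⟨p1, p2⟩, p3⟩, p4⟩, p5⟩, p6⟩ := hk
    have hP : pvPartner d (i, j) = (i - 1, j) := by
      unfold pvPartner; simp [pv_nl_isL_false _ _ p1, p2]
    rw [hP] at hyp
    obtain ⟨hyi, hyj⟩ := Prod.mk.injEq .. |>.mp hyp
    subst hyi; subst hyj
    have e1 : i - 1 + 1 = i := by ring
    have e2 : i - 1 - 1 = i - 2 := by ring
    have e3 : i - 1 + 2 = i + 1 := by ring
    have e4 : i - 1 - 2 = i - 3 := by ring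
    rw [e1, e2, e3, e4] at hoky
    rcases hoky with ((hy' | hy') | hy') | hy'
    · constructor
      · unfold pvPartner
        simp [e1, hpIsL]
      · unfold pvEntry
        simp only [e1, e2, e3, e4]
        simp only [hpIsL, if_true, pv_nl_isL_false _ _ p1, Bool.false_eq_true, if_false, p2,
          hpgetD, hygetD]
        unfold pvDotX at p6
        simp only [Prod.mk.injEq]
        refine ⟨?_, by trivial⟩
        exact pv_loc_flip _ _ (bne_iff_ne.mp p6)
    · exact absurd hy'.1.1.1.1.2 (by simp [pv_nl_isL_false _ _ p5])
    · exact absurd hy'.1.1.1.1.1 (by simp [pv_isL_nl_false _ _ hpIsL])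
    · exact absurd hy'.1.1.1.1.1 (by simp [pv_isL_nl_false _ _ hpIsL])
  · -- partner to the right: p = left cell of a horizontal pair
    obtain ⟨⟨⟨⟨⟨p1, p2⟩, p3⟩, p4⟩, p5⟩, p6⟩ := hk
    have hP : pvPartner d (i, j) = (i, j + 1) := by
      unfold pvPartner; simp [pv_nl_isL_false _ _ p1, pv_nl_isL_false _ _ p2, p3]
    rw [hP] at hyp
    obtain ⟨hyi, hyj⟩ := Prod.mk.injEq .. |>.mp hyp
    subst hyi; subst hyj
    have e1 : j + 1 + 1 = j + 2 := by ring
    have e2 : j + 1 - 1 = j := by ring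
    have e3 : j + 1 - 2 = j - 1 := by ring
    rw [e1, e2, e3] at hoky
    rcases hoky with ((hy' | hy') | hy') | hy'
    · exact absurd hy'.1.1.2 (by simp [hpIsL])
    · exact absurd hy'.1.1.2 (by simp [hpIsL])
    · exact absurd hy'.1.1.2 (by simp [pv_isL_nl_false _ _ hpIsL])
    · constructor
      · unfold pvPartner
        simp [pv_nl_isL_false _ _ hy'.1.1.1.1.1, pv_nl_isL_false _ _ hy'.1.1.1.1.2,
          pv_nl_isL_false _ _ hy'.1.1.1.2, e1, e2, e3]
      · unfold pvEntry
        simp only [e1, e2, e3]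
        simp only [pv_nl_isL_false _ _ hy'.1.1.1.1.1, pv_nl_isL_false _ _ hy'.1.1.1.1.2,
          pv_nl_isL_false _ _ hy'.1.1.1.2, pv_nl_isL_false _ _ p1, pv_nl_isL_false _ _ p2,
          Bool.false_eq_true, if_false, p3, if_true, hpgetD, hygetD, hpIsL]
        unfold pvDotX at p6
        simp only [Prod.mk.injEq]
        refine ⟨?_, by trivial⟩
        exact pv_loc_flip _ _ (Ne.symm (bne_iff_ne.mp p6))
  · -- partner to the left: p = right cell of a horizontal pair
    obtain ⟨⟨⟨⟨⟨p1, p2⟩, p3⟩, p4⟩, p5⟩, p6⟩ := hk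
    have hP : pvPartner d (i, j) = (i, j - 1) := by
      unfold pvPartner; simp [pv_nl_isL_false _ _ p1, pv_nl_isL_false _ _ p2,
        pv_nl_isL_false _ _ p3]
    rw [hP] at hyp
    obtain ⟨hyi, hyj⟩ := Prod.mk.injEq .. |>.mp hyp
    subst hyi; subst hyj
    have e1 : j - 1 + 1 = j := by ring
    have e2 : j - 1 - 1 = j - 2 := by ring
    have e3 : j - 1 + 2 = j + 1 := by ring
    have e4 : j - 1 - 2 = j - 3 := by ring
    rw [e1, e2, e3, e4] at hoky
    rcases hoky with ((hy' | hy') | hy') | hy'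
    · exact absurd hy'.1.1.1.2 (by simp [hpIsL])
    · exact absurd hy'.1.1.1.2 (by simp [hpIsL])
    · constructor
      · unfold pvPartner
        simp [pv_nl_isL_false _ _ hy'.1.1.1.1.1, pv_nl_isL_false _ _ hy'.1.1.1.1.2,
          hy'.1.1.1.2, e1]
      · unfold pvEntry
        simp only [e1, e2, e3, e4]
        simp only [pv_nl_isL_false _ _ hy'.1.1.1.1.1, pv_nl_isL_false _ _ hy'.1.1.1.1.2,
          pv_nl_isL_false _ _ p1, pv_nl_isL_false _ _ p2, pv_nl_isL_false _ _ p3,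
          Bool.false_eq_true, if_false, hy'.1.1.1.2, if_true, hpgetD, hygetD, hpIsL, p4]
        unfold pvDotX at p6
        simp only [Prod.mk.injEq]
        refine ⟨?_, by trivial⟩
        exact pv_loc_flip _ _ (bne_iff_ne.mp p6)
    · exact absurd hy'.1.1.1.2 (by simp [pv_isL_nl_false _ _ hpIsL])

theorem pv_partner_isL (d : PySem.Dict (Int × Int) String)
    (h2' : ∀ r ∈ pvL d, pvCellOK d r.1.1 r.1.2 = true) :
    ∀ p ∈ pvL d, pvIsL d (pvPartner d p.1) = true := by
  intro p hp
  have hok := h2' p hp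
  unfold pvCellOK at hok
  simp only [Bool.or_eq_true, Bool.and_eq_true] at hok
  unfold pvPartner
  rcases hok with ((hk | hk) | hk) | hk
  · simp [hk.1.1.1.1.1]
  · simp [pv_nl_isL_false _ _ hk.1.1.1.1.1, hk.1.1.1.1.2]
  · simp [pv_nl_isL_false _ _ hk.1.1.1.1.1, pv_nl_isL_false _ _ hk.1.1.1.1.2, hk.1.1.1.2]
  · simp [pv_nl_isL_false _ _ hk.1.1.1.1.1, pv_nl_isL_false _ _ hk.1.1.1.1.2,
      pv_nl_isL_false _ _ hk.1.1.1.2, hk.1.1.2]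

theorem pv_todel_mem (d : PySem.Dict (Int × Int) String) (hnd : d.keys.Nodup)
    (h2' : ∀ r ∈ pvL d, pvCellOK d r.1.1 r.1.2 = true) (x : Int × Int) :
    x ∈ (pvL d).flatMap (fun p => [p.1, pvPartner d p.1]) ↔ x ∈ (pvL d).map Prod.fst := by
  constructor
  · intro hx
    obtain ⟨p, hp, hxp⟩ := List.mem_flatMap.mp hx
    rcases List.mem_cons.mp hxp with h | h2
    · exact h ▸ List.mem_map.mpr ⟨p, hp, rfl⟩
    · have h := List.mem_singleton.mp h2
      exact h ▸ pv_fst_memL_of_isL d _ (pv_partner_isL d h2' p hp)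
  · intro hx
    obtain ⟨p, hp, hxp⟩ := List.mem_map.mp hx
    exact List.mem_flatMap.mpr ⟨p, hp, by simp [hxp]⟩

theorem pv_contains_congr {l1 l2 : List (Int × Int)}
    (hiff : ∀ y, y ∈ l1 ↔ y ∈ l2) (y : Int × Int) : l1.contains y = l2.contains y := by
  cases h : l2.contains y
  · have : y ∉ l2 := by simpa using h
    have : y ∉ l1 := fun hy => this ((hiff y).mp hy)
    simpa using this
  · have : y ∈ l2 := by simpa using h
    have : y ∈ l1 := (hiff y).mpr this
    simpa using this

-- picking the '.' end: next(e for e in ends if …) as an if-then-else, under the XOR condition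
theorem pv_filter_head_dotX (d : PySem.Dict (Int × Int) String) (a b : Int × Int)
    (h : pvDotX d a b = true) :
    (([a, b].filter (fun e => d.getD e "" == ".")).head?)
      = some (if d.getD a "" == "." then a else b) := by
  unfold pvDotX at h
  cases ha : (d.getD a "" == ".") <;> cases hb : (d.getD b "" == ".") <;>
    rw [ha, hb] at h <;> simp [List.filter, ha, hb] <;> exact absurd h (by decide)

-- getD = "." forces an actual '.' cell
theorem pv_getD_dot (d : PySem.Dict (Int × Int) String) (a : Int × Int)
    (h : (d.getD a "" == ".") = true) : d.get? a = some "." := by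
  rw [PySem.Dict.getD_eq_get?_getD] at h
  cases hq : d.get? a with
  | none => rw [hq] at h; exact absurd h (by decide)
  | some v => rw [hq] at h; simp only [Option.getD_some, beq_iff_eq] at h; rw [h]

-- the anchor key of an entry is a '.' cell of the maze
theorem pv_dotX_right (d : PySem.Dict (Int × Int) String) {a b : Int × Int}
    (h : pvDotX d a b = true) (ha : (d.getD a "" == ".") = false) :
    (d.getD b "" == ".") = true := by
  unfold pvDotX at h
  rw [ha] at h
  simpa using h

theorem pv_entry_key_dot (d : PySem.Dict (Int × Int) String)
    {p : (Int × Int) × String} (hok : pvCellOK d p.1.1 p.1.2 = true) :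
    d.get? (pvEntry d p).1 = some "." := by
  rw [pvEntry_fst]
  unfold pvCellOK at hok
  simp only [Bool.or_eq_true, Bool.and_eq_true] at hok
  unfold pvNewloc
  rcases hok with ((hk | hk) | hk) | hk
  · simp only [hk.1.1.1.1.1, if_true]
    by_cases hc : (d.getD (p.1.1 - 1, p.1.2) "" == ".") = true
    · rw [if_pos hc]; exact pv_getD_dot d _ hc
    · rw [if_neg hc]
      exact pv_getD_dot d _ (pv_dotX_right d hk.2 (by simpa using hc))
  · simp only [pv_nl_isL_false _ _ hk.1.1.1.1.1, hk.1.1.1.1.2, Bool.false_eq_true, if_false, if_true]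
    by_cases hc : (d.getD (p.1.1 + 1, p.1.2) "" == ".") = true
    · rw [if_pos hc]; exact pv_getD_dot d _ hc
    · rw [if_neg hc]
      have hdx : pvDotX d (p.1.1 + 1, p.1.2) (p.1.1 - 2, p.1.2) = true := by
        have := hk.2
        unfold pvDotX at this ⊢
        cases h1 : (d.getD (p.1.1 - 2, p.1.2) "" == ".") <;>
          cases h2 : (d.getD (p.1.1 + 1, p.1.2) "" == ".") <;>
          rw [h1, h2] at this <;> simp_all
      exact pv_getD_dot d _ (pv_dotX_right d hdx (by simpa using hc))
  · simp only [pv_nl_isL_false _ _ hk.1.1.1.1.1, pv_nl_isL_false _ _ hk.1.1.1.1.2,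
      hk.1.1.1.2, Bool.false_eq_true, if_false, if_true]
    by_cases hc : (d.getD (p.1.1, p.1.2 - 1) "" == ".") = true
    · rw [if_pos hc]; exact pv_getD_dot d _ hc
    · rw [if_neg hc]
      exact pv_getD_dot d _ (pv_dotX_right d hk.2 (by simpa using hc))
  · simp only [pv_nl_isL_false _ _ hk.1.1.1.1.1, pv_nl_isL_false _ _ hk.1.1.1.1.2,
      pv_nl_isL_false _ _ hk.1.1.1.2, Bool.false_eq_true, if_false]
    by_cases hc : (d.getD (p.1.1, p.1.2 + 1) "" == ".") = true
    · rw [if_pos hc]; exact pv_getD_dot d _ hc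
    · rw [if_neg hc]
      have hdx : pvDotX d (p.1.1, p.1.2 + 1) (p.1.1, p.1.2 - 2) = true := by
        have := hk.2
        unfold pvDotX at this ⊢
        cases h1 : (d.getD (p.1.1, p.1.2 - 2) "" == ".") <;>
          cases h2 : (d.getD (p.1.1, p.1.2 + 1) "" == ".") <;>
          rw [h1, h2] at this <;> simp_all
      exact pv_getD_dot d _ (pv_dotX_right d hdx (by simpa using hc))

-- B's loop body at a letter cell: exactly one insert when the cell anchors, none otherwise
theorem pvPairB_char (d letters : PySem.Dict (Int × Int) String)
    (hc : ∀ q, letters.contains q = pvIsL d q)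
    (hg : ∀ q, pvIsL d q = true → letters.getD q "" = d.getD q "")
    (acc : PySem.Dict (Int × Int) String)
    {p : (Int × Int) × String} (hok : pvCellOK d p.1.1 p.1.2 = true) :
    pvPairB d letters acc p
      = if pvAnch d p.1 then acc.insert (pvEntry d p).1 (pvEntry d p).2 else acc := by
  unfold pvPairB
  simp only [List.foldl_cons, List.foldl_nil, hc]
  simp only [mul_one, mul_zero, add_zero, sub_zero]
  have hok' := hok
  unfold pvCellOK at hok'
  simp only [Bool.or_eq_true, Bool.and_eq_true] at hok'
  rcases hok' with ((hk | hk) | hk) | hk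
  · -- mate below
    have hdx := hk.2
    have hb : pvIsL d (p.1.1 + 1, p.1.2) = true := hk.1.1.1.1.1
    have hr : pvIsL d (p.1.1, p.1.2 + 1) = false := by
      have := hk.1.1.1.2; rwa [Bool.not_eq_true'] at this
    simp only [hb, hr, if_true, Bool.false_eq_true, if_false]
    rw [pv_filter_head_dotX d _ _ hdx]
    unfold pvAnch pvEntry
    simp only [hb, Bool.true_or, if_true, hg _ hb]
  · -- mate above: neither down nor right fires
    have hb : pvIsL d (p.1.1 + 1, p.1.2) = false := pv_nl_isL_false _ _ hk.1.1.1.1.1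
    have hr : pvIsL d (p.1.1, p.1.2 + 1) = false := by
      have := hk.1.1.1.2; rwa [Bool.not_eq_true'] at this
    unfold pvAnch
    simp [hb, hr]
  · -- mate right
    have hb : pvIsL d (p.1.1 + 1, p.1.2) = false := pv_nl_isL_false _ _ hk.1.1.1.1.1
    have ha : pvIsL d (p.1.1 - 1, p.1.2) = false := pv_nl_isL_false _ _ hk.1.1.1.1.2
    have hr : pvIsL d (p.1.1, p.1.2 + 1) = true := hk.1.1.1.2
    have hdx := hk.2
    simp only [hb, hr, Bool.false_eq_true, if_false, if_true]
    rw [pv_filter_head_dotX d _ _ hdx]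
    unfold pvAnch pvEntry
    simp only [hb, hr, ha, Bool.false_eq_true, if_false, if_true, Bool.false_or, hg _ hr]
  · -- mate left: neither down nor right fires
    have hb : pvIsL d (p.1.1 + 1, p.1.2) = false := pv_nl_isL_false _ _ hk.1.1.1.1.1
    have hr : pvIsL d (p.1.1, p.1.2 + 1) = false := pv_nl_isL_false _ _ hk.1.1.1.2
    unfold pvAnch
    simp [hb, hr]

-- a cell that does not anchor has an anchoring partner (above or left)
theorem pv_not_anch_partner_anch (d : PySem.Dict (Int × Int) String)
    {p : (Int × Int) × String} (hpIsL : pvIsL d p.1 = true)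
    (hok : pvCellOK d p.1.1 p.1.2 = true) (hna : pvAnch d p.1 = false) :
    pvAnch d (pvPartner d p.1) = true := by
  unfold pvAnch at hna
  simp only [Bool.or_eq_false_iff] at hna
  unfold pvCellOK at hok
  simp only [Bool.or_eq_true, Bool.and_eq_true] at hok
  rcases hok with ((hk | hk) | hk) | hk
  · exact absurd hk.1.1.1.1.1 (by simp [hna.1])
  · have hP : pvPartner d p.1 = (p.1.1 - 1, p.1.2) := by
      unfold pvPartner; simp [hna.1, hk.1.1.1.1.2]
    rw [hP]
    unfold pvAnch
    have : p.1.1 - 1 + 1 = p.1.1 := by ring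
    rw [this]
    simp only []
    have : pvIsL d (p.1.1, p.1.2) = true := by
      have hp : (p.1.1, p.1.2) = p.1 := rfl
      rw [hp]; exact hpIsL
    simp [this]
  · exact absurd hk.1.1.1.2 (by simp [hna.2])
  · have hP : pvPartner d p.1 = (p.1.1, p.1.2 - 1) := by
      unfold pvPartner
      simp [hna.1, hna.2, pv_nl_isL_false _ _ hk.1.1.1.1.2]
    rw [hP]
    unfold pvAnch
    have : p.1.2 - 1 + 1 = p.1.2 := by ring
    rw [this]
    have : pvIsL d (p.1.1, p.1.2) = true := by
      have hp : (p.1.1, p.1.2) = p.1 := rfl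
      rw [hp]; exact hpIsL
    simp [this]

-- the partner of an anchoring cell does not anchor
theorem pv_anch_partner_not_anch (d : PySem.Dict (Int × Int) String)
    {p : (Int × Int) × String} (hpIsL : pvIsL d p.1 = true)
    (hok : pvCellOK d p.1.1 p.1.2 = true) (hap : pvAnch d p.1 = true)
    {q : (Int × Int) × String} (hq1 : q.1 = pvPartner d p.1)
    (hokq : pvCellOK d q.1.1 q.1.2 = true) :
    pvAnch d q.1 = false := by
  obtain ⟨⟨i, j⟩, c⟩ := p
  obtain ⟨⟨yi, yj⟩, yc⟩ := q
  simp only at hpIsL hok hap hq1 hokq ⊢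
  unfold pvCellOK at hok
  simp only [Bool.or_eq_true, Bool.and_eq_true] at hok
  rcases hok with ((hk | hk) | hk) | hk
  · -- p's partner is below: q = (i+1, j)
    have hP : pvPartner d (i, j) = (i + 1, j) := by unfold pvPartner; simp [hk.1.1.1.1.1]
    rw [hP] at hq1
    have hyi : yi = i + 1 := congrArg Prod.fst hq1
    have hyj : yj = j := congrArg Prod.snd hq1
    rw [hyi, hyj] at hokq ⊢
    unfold pvCellOK at hokq
    simp only [Bool.or_eq_true, Bool.and_eq_true] at hokq
    have e2 : i + 1 - 1 = i := by ring
    rw [e2] at hokq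
    have hnlp : pvNl d (i, j) = false := pv_isL_nl_false _ _ hpIsL
    rcases hokq with ((⟨⟨⟨⟨⟨qa, qb⟩, qc⟩, qd⟩, qe⟩, qf⟩ |
        ⟨⟨⟨⟨⟨qa, qb⟩, qc⟩, qd⟩, qe⟩, qf⟩) | ⟨⟨⟨⟨⟨qa, qb⟩, qc⟩, qd⟩, qe⟩, qf⟩) |
        ⟨⟨⟨⟨⟨qa, qb⟩, qc⟩, qd⟩, qe⟩, qf⟩
    · exact absurd qb (by rw [hnlp]; decide)
    · unfold pvAnch
      rw [Bool.not_eq_true'] at qc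
      simp [pv_nl_isL_false _ _ qa, qc]
    · exact absurd qb (by rw [hnlp]; decide)
    · exact absurd qb (by rw [hnlp]; decide)
  · -- p's partner is above: p does not anchor, contradiction
    exact absurd hap (by
      unfold pvAnch
      have ha1 := pv_nl_isL_false _ _ hk.1.1.1.1.1
      have ha2 := hk.1.1.1.2
      rw [Bool.not_eq_true'] at ha2
      simp [ha1, ha2])
  · -- p's partner is right: q = (i, j+1)
    have hP : pvPartner d (i, j) = (i, j + 1) := by
      unfold pvPartner
      simp [pv_nl_isL_false _ _ hk.1.1.1.1.1, pv_nl_isL_false _ _ hk.1.1.1.1.2, hk.1.1.1.2]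
    rw [hP] at hq1
    have hyi : yi = i := congrArg Prod.fst hq1
    have hyj : yj = j + 1 := congrArg Prod.snd hq1
    rw [hyi, hyj] at hokq ⊢
    unfold pvCellOK at hokq
    simp only [Bool.or_eq_true, Bool.and_eq_true] at hokq
    have e2 : j + 1 - 1 = j := by ring
    rw [e2] at hokq
    have hnlp : pvNl d (i, j) = false := pv_isL_nl_false _ _ hpIsL
    rcases hokq with ((⟨⟨⟨⟨⟨qa, qb⟩, qc⟩, qd⟩, qe⟩, qf⟩ |
        ⟨⟨⟨⟨⟨qa, qb⟩, qc⟩, qd⟩, qe⟩, qf⟩) | ⟨⟨⟨⟨⟨qa, qb⟩, qc⟩, qd⟩, qe⟩, qf⟩) |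
        ⟨⟨⟨⟨⟨qa, qb⟩, qc⟩, qd⟩, qe⟩, qf⟩
    · exact absurd qd (by rw [Bool.not_eq_true', hpIsL]; decide)
    · exact absurd qd (by rw [Bool.not_eq_true', hpIsL]; decide)
    · exact absurd qd (by rw [hnlp]; decide)
    · unfold pvAnch
      simp [pv_nl_isL_false _ _ qa, pv_nl_isL_false _ _ qc]
  · -- p's partner is left: p does not anchor, contradiction
    exact absurd hap (by
      unfold pvAnch
      simp [pv_nl_isL_false _ _ hk.1.1.1.1.1, pv_nl_isL_false _ _ hk.1.1.1.2])

-- elements of pvL with the same key are equal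
theorem pv_memL_inj (d : PySem.Dict (Int × Int) String) (hnd : d.keys.Nodup)
    {p q : (Int × Int) × String} (hp : p ∈ pvL d) (hq : q ∈ pvL d) (h : p.1 = q.1) : p = q := by
  have h1 := pv_get?_of_memL d hnd hp
  have h2 := pv_get?_of_memL d hnd hq
  rw [h] at h1
  rw [h1] at h2
  obtain ⟨a, b⟩ := p
  obtain ⟨c, e⟩ := q
  simp only at h
  cases h
  simpa using (Option.some.injEq .. ▸ h2 : _)

-- the entries of A's toadd list and of B's anchored pass are the same up to duplication
theorem pv_entries_mem_iff (d : PySem.Dict (Int × Int) String) (hnd : d.keys.Nodup)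
    (h2' : ∀ r ∈ pvL d, pvCellOK d r.1.1 r.1.2 = true) (x : (Int × Int) × String) :
    x ∈ (pvL d).map (pvEntry d)
      ↔ x ∈ ((pvL d).filter (fun p => pvAnch d p.1)).map (pvEntry d) := by
  constructor
  · intro hx
    obtain ⟨p, hp, hxe⟩ := List.mem_map.mp hx
    by_cases hap : pvAnch d p.1 = true
    · exact List.mem_map.mpr ⟨p, List.mem_filter.mpr ⟨hp, hap⟩, hxe⟩
    · have hna : pvAnch d p.1 = false := by
        cases h : pvAnch d p.1
        · rfl
        · exact absurd h hap
      have hql := pv_partner_isL d h2' p hp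
      obtain ⟨v, hv⟩ := pv_exists_memL_of_isL d _ hql
      have hspec := pv_pair_spec d hnd h2' p hp (pvPartner d p.1, v) hv rfl
      have hanch := pv_not_anch_partner_anch d (pv_isL_of_memL d hnd hp) (h2' p hp) hna
      refine List.mem_map.mpr ⟨(pvPartner d p.1, v), List.mem_filter.mpr ⟨hv, hanch⟩, ?_⟩
      rw [hspec.2, hxe]
  · intro hx
    obtain ⟨p, hp, hxe⟩ := List.mem_map.mp hx
    exact List.mem_map.mpr ⟨p, List.mem_of_mem_filter hp, hxe⟩

-- distinct entry sources with distinct keys have distinct anchor cells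
theorem pv_newloc_inj_of (d : PySem.Dict (Int × Int) String) (hnd : d.keys.Nodup)
    (h2' : ∀ r ∈ pvL d, pvCellOK d r.1.1 r.1.2 = true)
    (hNe : ∀ p ∈ pvL d, ∀ q ∈ pvL d, p.1 ≠ q.1 → q.1 ≠ pvPartner d p.1 →
      pvNewloc d p.1 ≠ pvNewloc d q.1)
    {p q : (Int × Int) × String} (hp : p ∈ pvL d) (hq : q ∈ pvL d)
    (hkey : (pvEntry d p).1 = (pvEntry d q).1) :
    p = q ∨ q.1 = pvPartner d p.1 := by
  by_cases h1 : p.1 = q.1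
  · exact Or.inl (pv_memL_inj d hnd hp hq h1)
  · by_cases h2 : q.1 = pvPartner d p.1
    · exact Or.inr h2
    · exact absurd (by rw [← pvEntry_fst, ← pvEntry_fst, hkey]) (hNe p hp q hq h1 h2)

-- ordered-insert fold over existing distinct keys rewrites values in place
theorem pv_fold_add_items (xm xM ym yM : Int) :
    ∀ (W : List ((Int × Int) × String)) (dd : PySem.Dict (Int × Int) String),
      (∀ pr ∈ W, dd.contains pr.1 = true) → ((W.map Prod.fst).Nodup) →
      (W.foldl (pvAddBody xm xM ym yM) dd).items
        = dd.items.map (fun it =>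
            match W.find? (fun pr => pr.1 == it.1) with
            | some pr => (it.1,
                pr.2 ++ (if pr.1.1 == xm || pr.1.1 == xM || pr.1.2 == ym || pr.1.2 == yM then "out" else "in"))
            | none => it) := by
  intro W
  induction W with
  | nil =>
      intro dd _ _
      simp
  | cons pr W ih =>
      intro dd hW hnod
      have hc : dd.contains pr.1 = true := hW pr List.mem_cons_self
      have hW' : ∀ x ∈ W, (dd.insert pr.1
          (pr.2 ++ (if pr.1.1 == xm || pr.1.1 == xM || pr.1.2 == ym || pr.1.2 == yM then "out" else "in"))).contains x.1 = true := by
        intro x hx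
        rw [PySem.Dict.contains_insert]
        simp [hW x (List.mem_cons_of_mem pr hx)]
      have hnod' : (W.map Prod.fst).Nodup := by
        rw [List.map_cons] at hnod
        exact hnod.of_cons
      have hnm : pr.1 ∉ W.map Prod.fst := by
        rw [List.map_cons] at hnod
        exact (List.nodup_cons.mp hnod).1
      rw [List.foldl_cons]
      have hstep : pvAddBody xm xM ym yM dd pr = dd.insert pr.1
          (pr.2 ++ (if pr.1.1 == xm || pr.1.1 == xM || pr.1.2 == ym || pr.1.2 == yM then "out" else "in")) := rfl
      rw [hstep, ih _ hW' hnod',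
        PySem.Dict.items_insert_of_contains _ _ hc, List.map_map]
      apply List.map_congr_left
      intro it _
      simp only [Function.comp]
      by_cases hpp : it.1 = pr.1
      · have hb : (it.1 == pr.1) = true := by simpa using hpp
        have hb' : (pr.1 == it.1) = true := by simpa using hpp.symm
        simp only [hb, if_true, List.find?_cons, hb']
        have hfind : W.find? (fun x => x.1 == pr.1) = none := by
          cases hf : W.find? (fun x => x.1 == pr.1) with
          | none => rfl
          | some y =>
              have hy := List.find?_some hf
              have hym := List.mem_of_find?_eq_some hf
              simp only [beq_iff_eq] at hy
              exact absurd (List.mem_map.mpr ⟨y, hym, hy⟩) hnm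
        simp only [hpp, hfind]
      · have hb : (it.1 == pr.1) = false := by simpa using hpp
        have hb' : (pr.1 == it.1) = false := by simpa using (Ne.symm hpp)
        simp only [hb, Bool.false_eq_true, if_false, List.find?_cons, hb']

-- find? over key-nodup lists with the same members agrees
theorem pv_find?_eq {l1 l2 : List ((Int × Int) × String)}
    (h1 : (l1.map Prod.fst).Nodup) (hm : ∀ x, x ∈ l1 ↔ x ∈ l2) (k : Int × Int) :
    l1.find? (fun pr => pr.1 == k) = l2.find? (fun pr => pr.1 == k) := by
  cases hf : l1.find? (fun pr => pr.1 == k) with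
  | none =>
      have hno := List.find?_eq_none.mp hf
      symm
      exact List.find?_eq_none.mpr (fun x hx => hno x ((hm x).mpr hx))
  | some a =>
      have ha1 : (a.1 == k) = true := by simpa using List.find?_some hf
      have ha2 : a ∈ l1 := List.mem_of_find?_eq_some hf
      cases hg : l2.find? (fun pr => pr.1 == k) with
      | none =>
          exact absurd ha1 (by simpa using List.find?_eq_none.mp hg a ((hm a).mp ha2))
      | some b =>
          have hb1 : (b.1 == k) = true := by simpa using List.find?_some hg
          have hb2 : b ∈ l2 := List.mem_of_find?_eq_some hg
          have hb2' : b ∈ l1 := (hm b).mpr hb2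
          have : a = b := by
            apply List.inj_on_of_nodup_map h1 ha2 hb2'
            simp only [beq_iff_eq] at ha1 hb1
            rw [ha1, hb1]
          rw [this]

-- ===== VERDICT (by name: the statement is the Claim_ definition above) =====
theorem clean_maze_spec : Claim_equal_clean_maze := by
  intro maze hdom hpre
  obtain ⟨h1, h2, h3⟩ := hpre
  have hnd := pvToDict_nodup maze
  have h2' : ∀ r ∈ pvL (pvToDict maze), pvCellOK (pvToDict maze) r.1.1 r.1.2 = true := by
    intro r hr
    have hpred : pvPredL r = true := List.of_mem_filter hr
    unfold pvPredL at hpred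
    rw [Bool.not_eq_true'] at hpred
    exact h2 r (List.mem_of_mem_filter hr) hpred
  have hNe : ∀ p ∈ pvL (pvToDict maze), ∀ q ∈ pvL (pvToDict maze), p.1 ≠ q.1 →
      q.1 ≠ pvPartner (pvToDict maze) p.1 →
      pvNewloc (pvToDict maze) p.1 ≠ pvNewloc (pvToDict maze) q.1 := by
    intro p hp q hq hne1 hne2
    have hppred : PySem.Str.isIn p.2 "#. " = false := by
      have h' : pvPredL p = true := List.of_mem_filter hp
      unfold pvPredL at h'; rwa [Bool.not_eq_true'] at h'
    have hqpred : PySem.Str.isIn q.2 "#. " = false := by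
      have h' : pvPredL q = true := List.of_mem_filter hq
      unfold pvPredL at h'; rwa [Bool.not_eq_true'] at h'
    exact h3 p (List.mem_of_mem_filter hp) q (List.mem_of_mem_filter hq)
      hppred hqpred hne1 hne2
  have hLnd : (pvL (pvToDict maze)).Nodup :=
    List.Nodup.of_map Prod.fst (pvL_fst_nodup _ hnd)
  -- entry sources with the same anchor key are the same cell or a pair
  have hinj : ∀ {p q : (Int × Int) × String}, p ∈ pvL (pvToDict maze) → q ∈ pvL (pvToDict maze) →
      (pvEntry (pvToDict maze) p).1 = (pvEntry (pvToDict maze) q).1 →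
      pvEntry (pvToDict maze) p = pvEntry (pvToDict maze) q := by
    intro p q hp hq hkey
    rcases pv_newloc_inj_of _ hnd h2' hNe hp hq hkey with he | he
    · rw [he]
    · exact (pv_pair_spec _ hnd h2' p hp q hq he).2.symm
  -- membership agreement between A's dedup'ed entry list and B's anchored entry list
  have hmemAB : ∀ x, x ∈ PySem.Set.ofList ((pvL (pvToDict maze)).map (pvEntry (pvToDict maze)))
      ↔ x ∈ ((pvL (pvToDict maze)).filter (fun p => pvAnch (pvToDict maze) p.1)).map (pvEntry (pvToDict maze)) := by
    intro x
    rw [PySem.Set.mem_ofList]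
    exact pv_entries_mem_iff _ hnd h2' x
  -- key-nodup of A's dedup'ed entry list
  have hSAnd : ((PySem.Set.ofList ((pvL (pvToDict maze)).map (pvEntry (pvToDict maze)))).map Prod.fst).Nodup := by
    apply List.Nodup.map_on ?_ (PySem.Set.nodup_ofList _)
    intro a hma b hmb hk
    rw [PySem.Set.mem_ofList] at hma hmb
    obtain ⟨p, hp, hpa⟩ := List.mem_map.mp hma
    obtain ⟨q, hq, hqb⟩ := List.mem_map.mp hmb
    rw [← hpa, ← hqb]
    exact hinj hp hq (by rw [hpa, hqb, hk])
  -- key-nodup of B's anchored entry list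
  have hPBnd : ((((pvL (pvToDict maze)).filter (fun p => pvAnch (pvToDict maze) p.1)).map (pvEntry (pvToDict maze))).map Prod.fst).Nodup := by
    rw [List.map_map]
    apply List.Nodup.map_on ?_ (hLnd.sublist List.filter_sublist)
    intro a hma b hmb hk
    have haL := List.mem_of_mem_filter hma
    have hbL := List.mem_of_mem_filter hmb
    have haA : pvAnch (pvToDict maze) a.1 = true := by
      have := List.mem_filter.mp hma; exact this.2
    have hbA : pvAnch (pvToDict maze) b.1 = true := by
      have := List.mem_filter.mp hmb; exact this.2
    simp only [Function.comp] at hk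
    rcases pv_newloc_inj_of _ hnd h2' hNe haL hbL hk with he | he
    · exact he
    · exfalso
      have hanB : pvAnch (pvToDict maze) b.1 = false :=
        pv_anch_partner_not_anch _ (pv_isL_of_memL _ hnd haL) (h2' a haL)
          haA he (h2' b hbL)
      rw [hanB] at hbA
      exact absurd hbA (by decide)
  -- letters dict facts
  have hc := pv_letters_contains (pvToDict maze) hnd
  have hg := pv_letters_getD (pvToDict maze) hnd
  -- entry keys live in the erased dict
  have hd1contains : ∀ x ∈ PySem.Set.ofList ((pvL (pvToDict maze)).map (pvEntry (pvToDict maze))),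
      ((((pvL (pvToDict maze)).map Prod.fst).foldl (fun dd c => dd.erase c) (pvToDict maze)).contains x.1) = true := by
    intro x hx
    rw [PySem.Set.mem_ofList] at hx
    obtain ⟨p, hp, hpe⟩ := List.mem_map.mp hx
    have hget : (pvToDict maze).get? x.1 = some "." := by
      rw [← hpe]; exact pv_entry_key_dot _ (h2' p hp)
    have hmemitems : (x.1, ".") ∈ (pvToDict maze).items :=
      PySem.Dict.mem_items_of_get?_eq_some _ hget
    have hnotL : ((pvL (pvToDict maze)).map Prod.fst).contains x.1 = false := by
      cases hcl : ((pvL (pvToDict maze)).map Prod.fst).contains x.1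
      · rfl
      · exfalso
        have hxm : x.1 ∈ (pvL (pvToDict maze)).map Prod.fst := by simpa using hcl
        obtain ⟨r, hr, hre⟩ := List.mem_map.mp hxm
        have hgr := pv_get?_of_memL _ hnd hr
        rw [hre, hget] at hgr
        have hv : r.2 = "." := (Option.some.inj hgr).symm
        have hpredr : pvPredL r = true := List.of_mem_filter hr
        unfold pvPredL at hpredr
        rw [hv] at hpredr
        exact absurd hpredr (by decide)
    have hmem1 : (x.1, ".") ∈ ((((pvL (pvToDict maze)).map Prod.fst).foldl (fun dd c => dd.erase c) (pvToDict maze)).items) := by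
      rw [pv_foldl_erase_items]
      have hcond : (!(((pvL (pvToDict maze)).map Prod.fst).contains x.1)) = true := by
        rw [hnotL]; rfl
      exact List.mem_filter.mpr ⟨hmemitems, hcond⟩
    have hkeys := PySem.Dict.mem_keys_of_mem_items _ hmem1
    rw [PySem.Dict.contains_eq_decide_mem_keys]
    simpa using hkeys
  have hd1containsPB : ∀ x ∈ (((pvL (pvToDict maze)).filter (fun p => pvAnch (pvToDict maze) p.1)).map (pvEntry (pvToDict maze))),
      ((((pvL (pvToDict maze)).map Prod.fst).foldl (fun dd c => dd.erase c) (pvToDict maze)).contains x.1) = true := by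
    intro x hx
    exact hd1contains x ((hmemAB x).mpr hx)
  -- unfold the two programs
  unfold Spec_clean_maze
  show clean_maze maze = clean_maze_alt maze
  simp only [clean_maze, clean_maze_alt]
  -- identical bounding boxes
  simp only [List.map_map, Function.comp_def]
  -- A's loop
  rw [pv_loopA_char]
  dsimp only
  rw [List.nil_append, List.nil_append, pv_todel_eq _ h2', pv_toadd_eq _ h2']
  -- letters
  rw [pv_letters_items (pvToDict maze) hnd, pv_letters_keys (pvToDict maze) hnd]
  -- A's erase fold equals B's
  have hd1 : (PySem.Set.ofList
        ((pvL (pvToDict maze)).flatMap (fun p => [p.1, pvPartner (pvToDict maze) p.1]))).foldl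
        (fun dd c => dd.erase c) (pvToDict maze)
      = ((pvL (pvToDict maze)).map Prod.fst).foldl (fun dd c => dd.erase c) (pvToDict maze) := by
    apply PySem.Dict.ext
    rw [pv_foldl_erase_items, pv_foldl_erase_items]
    apply List.filter_congr
    intro x _
    have hiff : ∀ y, y ∈ PySem.Set.ofList
        ((pvL (pvToDict maze)).flatMap (fun p => [p.1, pvPartner (pvToDict maze) p.1]))
        ↔ y ∈ (pvL (pvToDict maze)).map Prod.fst := by
      intro y
      rw [PySem.Set.mem_ofList]
      exact pv_todel_mem (pvToDict maze) hnd h2' y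
    rw [pv_contains_congr hiff x.1]
  rw [hd1]
  -- B's portals dict: pair-once fold over the letter list
  have hports : (pvL (pvToDict maze)).foldl
        (pvPairB (pvToDict maze) ((pvToDict maze).items.foldl pvLetB PySem.Dict.empty)) PySem.Dict.empty
      = ((pvL (pvToDict maze)).filter (fun p => pvAnch (pvToDict maze) p.1)).foldl
          (fun acc p => acc.insert (pvEntry (pvToDict maze) p).1 (pvEntry (pvToDict maze) p).2) PySem.Dict.empty := by
    have hcongr := PySem.List.foldl_congr_mem (pvL (pvToDict maze))
      (pvPairB (pvToDict maze) ((pvToDict maze).items.foldl pvLetB PySem.Dict.empty))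
      (fun (acc : PySem.Dict (Int × Int) String) (p : (Int × Int) × String) =>
        if pvAnch (pvToDict maze) p.1
        then acc.insert (pvEntry (pvToDict maze) p).1 (pvEntry (pvToDict maze) p).2 else acc)
      PySem.Dict.empty
      (fun acc p hp => pvPairB_char (pvToDict maze) _ hc hg acc (h2' p hp))
    rw [hcongr]
    exact PySem.List.foldl_if_eq_foldl_filter
      (fun (p : (Int × Int) × String) => pvAnch (pvToDict maze) p.1) _ _ PySem.Dict.empty
  rw [hports]
  have hportsitems : (((pvL (pvToDict maze)).filter (fun p => pvAnch (pvToDict maze) p.1)).foldl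
        (fun acc p => acc.insert (pvEntry (pvToDict maze) p).1 (pvEntry (pvToDict maze) p).2) PySem.Dict.empty).items
      = ((pvL (pvToDict maze)).filter (fun p => pvAnch (pvToDict maze) p.1)).map (pvEntry (pvToDict maze)) := by
    rw [PySem.Dict.items_foldl_insert_fresh _ (fun p => (pvEntry (pvToDict maze) p).1)
      (fun p => (pvEntry (pvToDict maze) p).2) PySem.Dict.empty
      (fun a _ => by simp [PySem.Dict.contains_empty])
      (by simpa [List.map_map, Function.comp] using hPBnd)]
    simp [PySem.Dict.empty]
  rw [hportsitems]
  -- both final folds rewrite values of the erased dict in place; compare via find?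
  apply congrArg pvOfDict
  apply PySem.Dict.ext
  rw [pv_fold_add_items _ _ _ _ _ _ hd1contains hSAnd,
    pv_fold_add_items _ _ _ _ _ _ hd1containsPB hPBnd]
  apply List.map_congr_left
  intro it _
  rw [pv_find?_eq hSAnd hmemAB it.1]
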